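-- pv_equiv track=rewrite | github.com/MaiMarincic/Kattis_problems | kaleidoscopicpalindromes.py | check
-- ===== SOURCE A (Python) =====
-- def check(n, k):
--     if n == 0:
--         return True
--     digits = []
--     while n:
--         digits.append(int(n % k))
--         n //= k
--     niz = ''.join(map(str,digits[::-1]))
--     if niz == niz[::-1]:
--         return True
--     return False
-- ===== SOURCE B (Python) =====
-- def _repr(n, k):
--     # base-k representation of n, most significant digit first (recursive)
--     if n == 0:
--         return ""
--     return _repr(n // k, k) + str(n % k)
--
--
-- def check(n, k):
--     if n == 0:
--         return True
--     s = _repr(n, k)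
--     i, j = 0, len(s) - 1
--     while i < j:
--         if s[i] != s[j]:
--             return False
--         i += 1
--         j -= 1
--     return True
-- ===== Notes on version B (the rewrite author's own statement) =====
-- stated objective: alternative
-- what changed: A collects the base-k digits in a list, reverses it, joins it into a string and compares that string with its full reversal; B builds the representation most-significant-digit-first by recursion and checks palindromicity in place with two pointers, never materialising a reversed copy.
import Mathlib
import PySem

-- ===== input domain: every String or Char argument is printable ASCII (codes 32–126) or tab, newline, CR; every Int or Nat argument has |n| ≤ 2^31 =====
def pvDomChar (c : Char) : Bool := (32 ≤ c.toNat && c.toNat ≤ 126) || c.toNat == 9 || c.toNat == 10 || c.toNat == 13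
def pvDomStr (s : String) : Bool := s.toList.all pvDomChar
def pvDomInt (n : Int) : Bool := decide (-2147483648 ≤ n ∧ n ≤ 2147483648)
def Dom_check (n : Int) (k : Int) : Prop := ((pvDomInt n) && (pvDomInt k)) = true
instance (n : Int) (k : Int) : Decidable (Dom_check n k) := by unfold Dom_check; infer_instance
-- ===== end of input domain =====

-- B replaces A's digit-list + reverse + join + reversed-string comparison by building the
-- base-k string front-to-back recursively and checking it in place with two pointers (objective: alternative).

-- ===== PORT A =====
-- the loop 'while n: digits.append(int(n % k)); n //= k', as fuel recursion
-- (fuel 200 exceeds the iteration count on every input of Dom ∩ Pre_, where the loop terminates)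
def digitsA (fuel : Nat) (n k : Int) : List Int :=
  match fuel with
  | 0 => []
  | f + 1 => if n = 0 then [] else PySem.Int.mod n k :: digitsA f (PySem.Int.floordiv n k) k

def check (n : Int) (k : Int) : Bool :=
  if n = 0 then true
  else
    -- digits[::-1]
    match PySem.List.slice? (digitsA 200 n k) none none (-1) with
    | none => false  -- unreachable (step = -1 ≠ 0)
    | some rds =>
      let niz := PySem.Str.join "" (rds.map PySem.Int.toStr)   -- ''.join(map(str, …))
      -- niz == niz[::-1]
      match PySem.Str.slice? niz none none (-1) with
      | none => false  -- unreachable (step = -1 ≠ 0)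
      | some rev => if niz = rev then true else false

-- ===== PORT B =====
-- strings are represented by their char lists (PySem.Chars; exact on this domain)
-- _repr(n, k): base-k representation of n, most significant digit first (same fuel guard as A's loop)
def reprB (fuel : Nat) (n k : Int) : List Char :=
  match fuel with
  | 0 => []
  | f + 1 =>
      if n = 0 then []
      else reprB f (PySem.Int.floordiv n k) k ++ PySem.Int.toChars (PySem.Int.mod n k)

-- the two-pointer loop; s[i]/s[j] ported as getD (exact: the loop keeps 0 ≤ i < j ≤ len s - 1)
def pal2ptr (s : List Char) (i j : Nat) : Bool :=
  if i < j then
    if s.getD i ' ' ≠ s.getD j ' ' then false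
    else pal2ptr s (i + 1) (j - 1)
  else true
termination_by j - i
decreasing_by omega

def check_alt (n : Int) (k : Int) : Bool :=
  if n = 0 then true
  else
    let s := reprB 200 n k
    pal2ptr s 0 (s.length - 1)

-- ===== PRECONDITION & SPEC =====
-- exactly the inputs on which the Python A returns: for n ≠ 0, k = 0 raises ZeroDivisionError,
-- k ∈ {-1, 1} loops forever, and n < 0 with k ≥ 2 loops forever (n sticks at -1).
def Pre_check (n : Int) (k : Int) : Prop := n = 0 ∨ (0 < n ∧ 2 ≤ k) ∨ k ≤ -2
instance (n : Int) (k : Int) : Decidable (Pre_check n k) := by unfold Pre_check; infer_instance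
def pvWitness_check : Int × Int := (121, 10)

def Spec_check (n : Int) (k : Int) (out : Bool) : Prop := out = check_alt n k
instance (n : Int) (k : Int) (out : Bool) : Decidable (Spec_check n k out) := by unfold Spec_check; infer_instance

-- ===== CLAIM (what is proved, stated in full; the proofs are below) =====
def Claim_equal_check : Prop := ∀ (n : Int) (k : Int), Dom_check n k → Pre_check n k → Spec_check n k (check n k)

-- ===== LEMMAS AND PROOFS =====

theorem join_nil_eq_flatten {l : List (List Char)} : PySem.Chars.join [] l = l.flatten := by
  induction l with
  | nil => rfl
  | cons x xs ih =>
    cases xs with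
    | nil => simp [PySem.Chars.join, List.intercalate]
    | cons y ys => rw [PySem.Chars.join_cons_cons] at *; simp_all

-- B's string is A's string, for every fuel
theorem reprB_eq_join (fuel : Nat) (n k : Int) :
    reprB fuel n k
      = PySem.Chars.join [] (((digitsA fuel n k).reverse).map PySem.Int.toChars) := by
  induction fuel generalizing n with
  | zero => simp [reprB, digitsA, PySem.Chars.join_nil]
  | succ f ih =>
      by_cases h : n = 0
      · simp [reprB, digitsA, h, PySem.Chars.join_nil]
      · simp only [reprB, digitsA, if_neg h, List.reverse_cons, List.map_append,
          List.map_cons, List.map_nil, join_nil_eq_flatten, List.flatten_append]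
        rw [ih]
        simp [join_nil_eq_flatten]

-- the two-pointer loop checks mirror-equality of all positions between i and j
theorem pal2ptr_iff_forall (s : List Char) (i j : Nat) :
    pal2ptr s i j = true ↔ ∀ t, i ≤ t → t ≤ j → s.getD t ' ' = s.getD (i + j - t) ' ' := by
  induction i, j using pal2ptr.induct (s := s) with
  | case1 i j hij hne =>
      rw [pal2ptr, if_pos hij, if_pos hne]
      simp only [Bool.false_eq_true, false_iff]
      intro hall
      exact hne (by have := hall i le_rfl (Nat.le_of_lt hij); simpa using this)
  | case2 i j hij hne ih =>
      rw [pal2ptr, if_pos hij, if_neg hne, ih]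
      rw [not_not] at hne
      constructor
      · intro hall t ht1 ht2
        by_cases hti : t = i
        · subst hti
          have harith : t + j - t = j := by omega
          rw [harith]; exact hne
        · by_cases htj : t = j
          · subst htj
            have harith : i + t - t = i := by omega
            rw [harith]; exact hne.symm
          · have h1 : i + 1 ≤ t := by omega
            have h2 : t ≤ j - 1 := by omega
            have := hall t h1 h2
            have harith : i + 1 + (j - 1) - t = i + j - t := by omega
            rwa [harith] at this
      · intro hall t ht1 ht2
        have := hall t (by omega) (by omega)
        have harith : i + 1 + (j - 1) - t = i + j - t := by omega
        rwa [harith]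
  | case3 i j hij =>
      rw [pal2ptr, if_neg hij]
      simp only [true_iff]
      intro t ht1 ht2
      have : i + j - t = t := by omega
      rw [this]

-- the two-pointer loop started at (0, len - 1) decides "s equals its reverse"
theorem pal2ptr_palindrome (s : List Char) :
    pal2ptr s 0 (s.length - 1) = true ↔ s = s.reverse := by
  rw [pal2ptr_iff_forall]
  constructor
  · intro hall
    apply List.ext_getElem (by simp)
    intro t h1 h2
    have hmem := hall t (Nat.zero_le _) (by omega)
    have harith : 0 + (s.length - 1) - t = s.length - 1 - t := by omega
    rw [harith, List.getD_eq_getElem s ' ' h1, List.getD_eq_getElem s ' ' (by omega)] at hmem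
    rw [List.getElem_reverse]
    exact hmem
  · intro hpal t ht1 ht2
    by_cases hlen : t < s.length
    · have harith : 0 + (s.length - 1) - t = s.length - 1 - t := by omega
      rw [harith, List.getD_eq_getElem s ' ' hlen, List.getD_eq_getElem s ' ' (by omega)]
      rw [List.getElem_of_eq hpal, List.getElem_reverse]
    · have hnil : s.length = 0 := by omega
      have : s = [] := List.length_eq_zero_iff.mp hnil
      subst this
      rfl

-- ===== VERDICT (by name: the statement is the Claim_ definition above) =====
theorem check_spec : Claim_equal_check := by
  intro n k _ _
  unfold Spec_check check check_alt
  by_cases hn : n = 0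
  · simp [hn]
  · simp only [if_neg hn, PySem.List.slice?_none_none_neg_one,
      PySem.Str.slice?_none_none_neg_one]
    have hL : (PySem.Str.join "" ((digitsA 200 n k).reverse.map PySem.Int.toStr)).toList
        = reprB 200 n k := by
      rw [PySem.Str.toList_join, reprB_eq_join]
      simp [List.map_map, Function.comp_def, PySem.Int.toList_toStr]
    have key : (PySem.Str.join "" ((digitsA 200 n k).reverse.map PySem.Int.toStr)
          = String.ofList (PySem.Str.join "" ((digitsA 200 n k).reverse.map PySem.Int.toStr)).toList.reverse)
        ↔ (reprB 200 n k = (reprB 200 n k).reverse) := by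
      have hofl : ∀ l : List Char, (String.ofList l).toList = l := by simp
      rw [← String.toList_inj, hofl, hL]
    by_cases hp : reprB 200 n k = (reprB 200 n k).reverse
    · rw [if_pos (key.mpr hp)]
      exact ((pal2ptr_palindrome _).mpr hp).symm
    · rw [if_neg (fun h => hp (key.mp h))]
      symm
      rw [← Bool.not_eq_true, pal2ptr_palindrome]
      exact hp
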